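-- pv_equiv track=rewrite | github.com/VoidArchive/Code-War-Kata-Traning | Code War/Is_my_friends_cheating.py | remov_nb
-- ===== SOURCE A (Python) =====
-- def remov_nb(n):
--
--     # Did not pass the test. It works but took to long
--     res = []
--     sum_of_n = sum(range(1, n + 1))
--
--     for i in range(1, n):
--         for j in range(i+1, n+1):
--             if i*j == sum_of_n - (i+j):
--                 res.append((i, j))
--                 res.append((j, i))
--
--     return res
-- ===== SOURCE B (Python) =====
-- def remov_nb(n):
--     # O(n): for each i the equation i*j == S-(i+j) forces j = (S-i)/(i+1);
--     # check divisibility and range instead of scanning all j.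
--     total = n * (n + 1) // 2
--     res = []
--     for i in range(1, n):
--         q, r = divmod(total - i, i + 1)
--         if r == 0 and i < q <= n:
--             res.append((i, q))
--             res.append((q, i))
--     return res
-- ===== Notes on version B (the rewrite author's own statement) =====
-- stated objective: faster
-- what changed: Replaces the quadratic double scan over all pairs (i,j) by a single pass that, for each i, solves the equation for the unique candidate j=(S-i)/(i+1) and checks divisibility and range; the sum is computed in closed form n(n+1)/2.
import Mathlib
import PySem

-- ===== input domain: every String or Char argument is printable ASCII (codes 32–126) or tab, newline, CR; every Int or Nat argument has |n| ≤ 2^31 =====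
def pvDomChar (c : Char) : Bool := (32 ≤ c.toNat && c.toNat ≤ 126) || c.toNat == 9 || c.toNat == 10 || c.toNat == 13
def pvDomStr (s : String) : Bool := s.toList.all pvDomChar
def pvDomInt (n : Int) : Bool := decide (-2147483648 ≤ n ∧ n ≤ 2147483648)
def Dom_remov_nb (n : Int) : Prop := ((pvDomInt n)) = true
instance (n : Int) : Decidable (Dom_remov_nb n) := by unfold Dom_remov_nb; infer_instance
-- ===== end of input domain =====

-- B replaces A's quadratic pair scan by a single pass solving for the unique candidate j per i.

-- ===== PORT A =====
def remov_nb (n : Int) : List (List Int) :=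
  let sum_of_n : Int := (PySem.List.pyRange 1 (n + 1) 1).sum
  (PySem.List.pyRange 1 n 1).foldl (fun res i =>
    (PySem.List.pyRange (i + 1) (n + 1) 1).foldl (fun res j =>
      if i * j = sum_of_n - (i + j) then res ++ [[i, j], [j, i]] else res) res) []

-- ===== PORT B =====
def remov_nb_alt (n : Int) : List (List Int) :=
  let total : Int := PySem.Int.floordiv (n * (n + 1)) 2
  (PySem.List.pyRange 1 n 1).foldl (fun res i =>
    let q := PySem.Int.floordiv (total - i) (i + 1)
    let r := PySem.Int.mod (total - i) (i + 1)
    if r = 0 ∧ i < q ∧ q ≤ n then res ++ [[i, q], [q, i]] else res) []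

-- ===== PRECONDITION & SPEC =====
def Spec_remov_nb (n : Int) (out : List (List Int)) : Prop := out = remov_nb_alt n
instance (n : Int) (out : List (List Int)) : Decidable (Spec_remov_nb n out) := by unfold Spec_remov_nb; infer_instance

-- ===== CLAIM (what is proved, stated in full; the proofs are below) =====
def Claim_equal_remov_nb : Prop := ∀ (n : Int), Dom_remov_nb n → Spec_remov_nb n (remov_nb n)

-- ===== LEMMAS AND PROOFS =====

-- flatMap over a unit-step range of an 'exactly at q' body collapses to a single hit
lemma flatMap_range_ite_eq {α : Type} (m : Nat) (f : Int → List α) :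
    ∀ (a q : Int),
      (PySem.List.pyRange a (a + (m : Int)) 1).flatMap
          (fun j => if j = q then f j else []) =
        if a ≤ q ∧ q < a + (m : Int) then f q else [] := by
  induction m with
  | zero =>
    intro a q
    rw [PySem.List.pyRange_one_eq_nil (by omega)]
    simp only [List.flatMap_nil]
    rw [if_neg (show ¬(a ≤ q ∧ q < a + ((0 : Nat) : Int)) by omega)]
  | succ m ih =>
    intro a q
    rw [PySem.List.pyRange_one_cons (by omega : a < a + ((m + 1 : Nat) : Int))]
    rw [List.flatMap_cons,
        show a + ((m + 1 : Nat) : Int) = (a + 1) + (m : Int) by push_cast; ring,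
        ih (a + 1) q]
    by_cases hq : a = q
    · subst hq
      rw [if_pos rfl,
          if_neg (show ¬(a + 1 ≤ a ∧ a < a + 1 + (m : Int)) by omega),
          if_pos (show a ≤ a ∧ a < a + 1 + (m : Int) by omega)]
      simp
    · rw [if_neg hq, List.nil_append]
      by_cases h2 : a + 1 ≤ q ∧ q < a + 1 + (m : Int)
      · rw [if_pos h2, if_pos (show a ≤ q ∧ q < a + 1 + (m : Int) by omega)]
      · rw [if_neg h2, if_neg (show ¬(a ≤ q ∧ q < a + 1 + (m : Int)) by omega)]

-- sum of 1..n equals the closed form n*(n+1)//2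
lemma sum_range_closed (m : Nat) : ∀ (n : Int), n = (m : Int) →
    (PySem.List.pyRange 1 (n + 1) 1).sum = PySem.Int.floordiv (n * (n + 1)) 2 := by
  induction m with
  | zero =>
    intro n hn; subst hn
    rw [PySem.List.pyRange_one_eq_nil (by omega)]
    rw [PySem.Int.floordiv_eq_ediv_of_pos (by omega)]
    norm_num
  | succ m ih =>
    intro n hn
    rw [PySem.List.pyRange_one_succ_right (by omega : (1 : Int) ≤ n)]
    have hih := ih (n - 1) (by omega)
    rw [show n - 1 + 1 = n by ring] at hih
    rw [List.sum_append, hih]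
    rw [PySem.Int.floordiv_eq_ediv_of_pos (by omega),
        PySem.Int.floordiv_eq_ediv_of_pos (by omega)]
    have hK : n * (n + 1) = (n - 1) * n + 2 * n := by ring
    simp only [List.sum_cons, List.sum_nil]
    omega

-- per-i: the inner scan of A contributes exactly B's single candidate
lemma inner_eq (S n i : Int) (hi : 1 ≤ i) :
    (PySem.List.pyRange (i + 1) (n + 1) 1).flatMap
        (fun j => if i * j = S - (i + j) then [[i, j], [j, i]] else []) =
      (if PySem.Int.mod (S - i) (i + 1) = 0 ∧
            i < PySem.Int.floordiv (S - i) (i + 1) ∧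
            PySem.Int.floordiv (S - i) (i + 1) ≤ n
        then [[i, PySem.Int.floordiv (S - i) (i + 1)],
              [PySem.Int.floordiv (S - i) (i + 1), i]] else []) := by
  set q := PySem.Int.floordiv (S - i) (i + 1) with hqdef
  set r := PySem.Int.mod (S - i) (i + 1) with hrdef
  have hq : q = (S - i) / (i + 1) := by
    rw [hqdef, PySem.Int.floordiv_eq_ediv_of_pos (by omega)]
  have hr : r = (S - i) % (i + 1) := by
    rw [hrdef, PySem.Int.mod_eq_emod_of_pos (by omega)]
  have key : ∀ j : Int, (i * j = S - (i + j)) ↔ (r = 0 ∧ j = q) := by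
    intro j
    rw [hq, hr]
    constructor
    · intro h
      have h' : j * i = S - i - j := by rw [mul_comm]; linarith
      have hj : S - i = j * (i + 1) := by
        have : j * (i + 1) = j * i + j := by ring
        linarith
      constructor
      · rw [hj]; exact Int.mul_emod_left j (i + 1)
      · rw [hj, Int.mul_ediv_cancel _ (by omega : i + 1 ≠ 0)]
    · rintro ⟨h1, h2⟩
      have hd : (i + 1) ∣ (S - i) := Int.dvd_of_emod_eq_zero h1
      have h3 : (S - i) / (i + 1) * (i + 1) = S - i := Int.ediv_mul_cancel hd
      subst h2
      have h4 : (S - i) / (i + 1) * (i + 1) = (S - i) / (i + 1) * i + (S - i) / (i + 1) := by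
        ring
      rw [mul_comm]
      linarith
  by_cases hr0 : r = 0
  · have hbody : (fun j : Int => if i * j = S - (i + j) then ([[i, j], [j, i]] : List (List Int)) else [])
        = (fun j : Int => if j = q then [[i, j], [j, i]] else []) := by
      funext j
      by_cases hj : j = q
      · rw [if_pos hj, if_pos ((key j).mpr ⟨hr0, hj⟩)]
      · rw [if_neg hj, if_neg (fun h => hj ((key j).mp h).2)]
    rw [hbody]
    by_cases hb : i + 1 ≤ n + 1
    · obtain ⟨m, hm⟩ : ∃ m : Nat, n + 1 = (i + 1) + (m : Int) :=
        ⟨(n - i).toNat, by omega⟩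
      rw [hm, flatMap_range_ite_eq]
      by_cases hc : i + 1 ≤ q ∧ q < i + 1 + (m : Int)
      · rw [if_pos hc, if_pos (show r = 0 ∧ i < q ∧ q ≤ n from ⟨hr0, by omega, by omega⟩)]
      · rw [if_neg hc, if_neg (show ¬(r = 0 ∧ i < q ∧ q ≤ n) by rintro ⟨-, h2, h3⟩; omega)]
    · rw [PySem.List.pyRange_one_eq_nil (by omega)]
      rw [if_neg (show ¬(r = 0 ∧ i < q ∧ q ≤ n) by rintro ⟨-, h2, h3⟩; omega)]
      rfl
  · have hnil : ∀ j ∈ PySem.List.pyRange (i + 1) (n + 1) 1,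
        (if i * j = S - (i + j) then ([[i, j], [j, i]] : List (List Int)) else []) = [] := by
      intro j _
      rw [if_neg (fun h => hr0 ((key j).mp h).1)]
    rw [List.flatMap_eq_nil_iff.mpr hnil, if_neg (by rintro ⟨h1, -⟩; exact hr0 h1)]

-- ===== VERDICT (by name: the statement is the Claim_ definition above) =====
theorem remov_nb_spec : Claim_equal_remov_nb := by
  intro n _
  unfold Spec_remov_nb remov_nb remov_nb_alt
  simp only []
  by_cases hn : 1 < n
  · rw [sum_range_closed n.toNat n (by omega)]
    set S := PySem.Int.floordiv (n * (n + 1)) 2 with hS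
    apply Eq.symm
    apply PySem.List.foldl_congr_mem
    intro acc i hi
    have hi1 : 1 ≤ i := (PySem.List.mem_pyRange_one.mp hi).1
    have hf : (fun (res : List (List Int)) (j : Int) =>
          if i * j = S - (i + j) then res ++ [[i, j], [j, i]] else res)
        = (fun res j => res ++ (if i * j = S - (i + j) then [[i, j], [j, i]] else [])) := by
      funext res j; split <;> simp
    rw [hf, PySem.List.foldl_append_eq_flatMap, inner_eq S n i hi1]
    split <;> simp
  · rw [PySem.List.pyRange_one_eq_nil (by omega : n ≤ 1)]
    rfl
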